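-- pv_equiv track=rewrite | github.com/Yash-Bhanushali-21/LeetCodeProblems | 1630-arithmetic-subarrays/1630-arithmetic-subarrays.py | has_same_difference
-- ===== SOURCE A (Python) =====
-- def has_same_difference(arr):
--     if len(arr) < 2:
--         return True
--
--     common_difference = arr[1] - arr[0]
--
--     for i in range(2, len(arr)):
--         if arr[i] - arr[i-1] != common_difference:
--             return False
--     return True
-- ===== SOURCE B (Python) =====
-- def has_same_difference(arr):
--     diffs = {b - a for a, b in zip(arr, arr[1:])}
--     return len(diffs) <= 1
-- ===== Notes on version B (the rewrite author's own statement) =====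
-- stated objective: idiomatic
-- what changed: B builds the set of all consecutive differences via zip and checks post-hoc that at most one distinct difference exists, instead of A's index loop comparing each difference against a fixed reference with early exit.
import Mathlib
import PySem

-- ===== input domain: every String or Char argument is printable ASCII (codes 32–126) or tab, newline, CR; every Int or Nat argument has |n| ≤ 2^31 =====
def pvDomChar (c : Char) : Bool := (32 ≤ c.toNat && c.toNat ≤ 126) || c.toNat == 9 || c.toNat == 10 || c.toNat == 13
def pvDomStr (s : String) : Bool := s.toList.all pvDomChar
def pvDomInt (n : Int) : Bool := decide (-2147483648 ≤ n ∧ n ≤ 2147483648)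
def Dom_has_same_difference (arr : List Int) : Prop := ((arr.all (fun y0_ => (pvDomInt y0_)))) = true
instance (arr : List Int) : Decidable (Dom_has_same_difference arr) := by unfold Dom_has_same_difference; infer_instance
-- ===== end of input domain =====

-- B builds the set of all consecutive differences and checks it has at most one
-- distinct element, instead of A's index loop against a fixed reference difference.

-- ===== PORT A =====
def has_same_difference (arr : List Int) : Bool :=
  if arr.length < 2 then true
  else
    let common_difference := PySem.List.pyGetD arr 1 0 - PySem.List.pyGetD arr 0 0
    -- 'for i in range(2, len(arr)): if ... != cd: return False' as an && fold
    (PySem.List.pyRange 2 (arr.length : Int) 1).foldl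
      (fun acc i =>
        acc && (PySem.List.pyGetD arr i 0 - PySem.List.pyGetD arr (i - 1) 0 == common_difference))
      true

-- ===== PORT B =====
def has_same_difference_alt (arr : List Int) : Bool :=
  decide (PySem.Set.len
    (PySem.Set.ofList ((arr.zip (PySem.List.slice arr (some 1) none)).map (fun p => p.2 - p.1)))
    ≤ 1)

-- ===== PRECONDITION & SPEC =====
def Spec_has_same_difference (arr : List Int) (out : Bool) : Prop := out = has_same_difference_alt arr
instance (arr : List Int) (out : Bool) : Decidable (Spec_has_same_difference arr out) := by unfold Spec_has_same_difference; infer_instance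

-- ===== CLAIM (what is proved, stated in full; the proofs are below) =====
def Claim_equal_has_same_difference : Prop := ∀ (arr : List Int), Dom_has_same_difference arr → Spec_has_same_difference arr (has_same_difference arr)

-- ===== LEMMAS AND PROOFS =====

theorem foldl_and_eq_all {α : Type} (l : List α) (p : α → Bool) (acc : Bool) :
    l.foldl (fun a x => a && p x) acc = (acc && l.all p) := by
  induction l generalizing acc with
  | nil => simp
  | cons x xs ih => simp [List.foldl_cons, ih, Bool.and_assoc]

theorem length_le_foldl_add {α : Type} [BEq α] (l : List α) (s : PySem.Set α) :
    s.length ≤ (l.foldl PySem.Set.add s).length := by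
  induction l generalizing s with
  | nil => simp
  | cons x xs ih =>
    refine le_trans ?_ (ih (PySem.Set.add s x))
    simp only [PySem.Set.add]
    split <;> simp

theorem set_len_le_one (rest : List Int) (d0 : Int) :
    decide ((rest.foldl PySem.Set.add [d0]).length ≤ 1) = rest.all (fun d => d == d0) := by
  induction rest with
  | nil => simp
  | cons x xs ih =>
    by_cases hx : x = d0
    · subst hx
      simpa [PySem.Set.add, PySem.Set.contains] using ih
    · have hA : PySem.Set.add [d0] x = [d0, x] := by
        simp [PySem.Set.add, PySem.Set.contains, hx]
      have h2 : (2:Nat) ≤ (xs.foldl PySem.Set.add [d0, x]).length := by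
        simpa using length_le_foldl_add xs [d0, x]
      simp only [List.foldl_cons, List.all_cons, hA]
      have hng : ¬ ((xs.foldl PySem.Set.add [d0, x]).length ≤ 1) := by omega
      simp [hng, hx]

theorem zip_diffs_all (b : Int) (t : List Int) (cd : Int) :
    (((b :: t).zip t).map (fun p => p.2 - p.1)).all (fun d => d == cd)
      = (List.range t.length).all (fun k => t.getD k 0 - (b :: t).getD k 0 == cd) := by
  induction t generalizing b with
  | nil => simp
  | cons y ys ih =>
    rw [List.zip_cons_cons, List.map_cons, List.all_cons, ih y, List.length_cons,
        List.range_succ_eq_map, List.all_cons, List.all_map]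
    congr 1

theorem b_eq (a b : Int) (t : List Int) :
    has_same_difference_alt (a :: b :: t)
      = (List.range t.length).all (fun k => t.getD k 0 - (b :: t).getD k 0 == b - a) := by
  unfold has_same_difference_alt
  have hs : PySem.List.slice (a :: b :: t) (some 1) none = b :: t := by simp [pysem]
  rw [hs]
  simp only [List.zip_cons_cons, List.map_cons]
  have key : ∀ L : List Int,
      decide ((PySem.Set.ofList ((b - a) :: L)).len ≤ 1) = L.all (fun d => d == b - a) := by
    intro L
    have h0 : PySem.Set.ofList ((b - a) :: L) = L.foldl PySem.Set.add [b - a] := rfl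
    rw [← set_len_le_one L (b - a), decide_eq_decide, h0]
    simp only [PySem.Set.len]
    omega
  exact (key (((b :: t).zip t).map (fun p => p.2 - p.1))).trans (zip_diffs_all b t (b - a))

theorem a_eq (a b : Int) (t : List Int) :
    has_same_difference (a :: b :: t)
      = (List.range t.length).all (fun k => t.getD k 0 - (b :: t).getD k 0 == b - a) := by
  unfold has_same_difference
  have hlen : ¬ ((a :: b :: t).length < 2) := by simp
  rw [if_neg hlen]
  have hcd : PySem.List.pyGetD (a :: b :: t) 1 0 - PySem.List.pyGetD (a :: b :: t) 0 0 = b - a := by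
    simp [pysem]
  rw [hcd]
  have hrange : PySem.List.pyRange 2 ((a :: b :: t).length : Int) 1
      = (List.range t.length).map (fun k => ((2 + k : Nat) : Int)) := by
    rw [PySem.List.pyRange_one]
    have e1 : (((a :: b :: t).length : Int) - 2).toNat = t.length := by simp; omega
    have e2 : (fun k : Nat => (2:Int) + ↑k) = (fun k : Nat => ((2 + k : Nat) : Int)) :=
      funext fun k => by push_cast; ring
    rw [e1, e2]
  rw [hrange, List.foldl_map, foldl_and_eq_all, Bool.true_and]
  congr 1
  funext k
  have e1 : 2 + k = k + 1 + 1 := by omega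
  have h1 : PySem.List.pyGetD (a :: b :: t) ((2 + k : Nat) : Int) 0 = t.getD k 0 := by
    rw [PySem.List.pyGetD_natCast, e1, List.getD_cons_succ, List.getD_cons_succ]
  have h2 : PySem.List.pyGetD (a :: b :: t) (((2 + k : Nat) : Int) - 1) 0 = (b :: t).getD k 0 := by
    have e2 : (((2 + k : Nat) : Int) - 1) = ((k + 1 : Nat) : Int) := by push_cast; ring
    rw [e2, PySem.List.pyGetD_natCast, List.getD_cons_succ]
  rw [h1, h2]

-- ===== VERDICT (by name: the statement is the Claim_ definition above) =====
theorem has_same_difference_spec : Claim_equal_has_same_difference := by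
  intro arr _
  unfold Spec_has_same_difference
  match arr with
  | [] => rfl
  | [x] => rfl
  | a :: b :: t => rw [a_eq, b_eq]
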